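-- pv_equiv track=rewrite | github.com/kaomoneus/tess-confusion | utils/confusion.py | _enumerate_wrong_spaces
-- ===== SOURCE A (Python) =====
-- import itertools
-- from typing import Dict, Iterable, Tuple, Union, List
--
-- def _enumerate_wrong_spaces(s: str, max_wrong_spaces: int):
--     orig_words = s.split()
--
--     first_word = orig_words[0]
--     remainder = orig_words[1:]
--     num_spaces = len(remainder)
--     space_indices = [*range(num_spaces)]
--
--     def _apply_wrong_mask(bad_mask: List[bool]):
--         res = [[first_word]]
--
--         for word, is_space_wrong in zip(remainder, bad_mask):
--             if is_space_wrong: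
--                 res[-1].append(word)
--             else:
--                 res.append([word])
--
--         res = [
--             " ".join(words_group) for words_group in res
--         ]
--
--         return res
--
--     wrong_combs = itertools.chain([set()], *(
--         map(
--             set,
--             itertools.combinations(space_indices, num_wrong_spaces)
--         ) for num_wrong_spaces in range(1, min(max_wrong_spaces + 1, num_spaces))
--     ))
--
--     for wrong_spaces_indices in wrong_combs:
--         wrong_spaces = [i in wrong_spaces_indices for i in space_indices]
--         yield _apply_wrong_mask(wrong_spaces)
-- ===== SOURCE B (Python) =====
-- import itertools
--
--
-- def _enumerate_wrong_spaces(s, max_wrong_spaces):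
--     # Recursive generation: groupings with exactly r merged spaces are produced
--     # directly by recursion on the position of the first merged space, building
--     # each grouping while choosing the merges (no combination subsets, no mask,
--     # no second per-subset pass).
--     words = s.split()
--     n = len(words) - 1  # number of spaces
--
--     def rec(i, r):
--         # groupings of words[i:] with exactly r merged spaces among spaces i..n-1
--         if r == 0:
--             yield [[w] for w in words[i:]]
--             return
--         for j in range(i, n - r + 1):  # j = first merged space
--             for tail in rec(j + 1, r - 1):
--                 yield [[w] for w in words[i:j]] + [[words[j]] + tail[0]] + tail[1:]
--
--     for r in itertools.chain([0], range(1, min(max_wrong_spaces + 1, n))):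
--         for grouping in rec(0, r):
--             yield [" ".join(g) for g in grouping]
-- ===== Notes on version B (the rewrite author's own statement) =====
-- stated objective: alternative
-- what changed: B generates groupings by direct recursion on the position of the first merged space, building each grouping while the merges are chosen, instead of A's itertools.combinations subsets followed by a per-subset boolean-mask fold over the words.
import Mathlib
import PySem

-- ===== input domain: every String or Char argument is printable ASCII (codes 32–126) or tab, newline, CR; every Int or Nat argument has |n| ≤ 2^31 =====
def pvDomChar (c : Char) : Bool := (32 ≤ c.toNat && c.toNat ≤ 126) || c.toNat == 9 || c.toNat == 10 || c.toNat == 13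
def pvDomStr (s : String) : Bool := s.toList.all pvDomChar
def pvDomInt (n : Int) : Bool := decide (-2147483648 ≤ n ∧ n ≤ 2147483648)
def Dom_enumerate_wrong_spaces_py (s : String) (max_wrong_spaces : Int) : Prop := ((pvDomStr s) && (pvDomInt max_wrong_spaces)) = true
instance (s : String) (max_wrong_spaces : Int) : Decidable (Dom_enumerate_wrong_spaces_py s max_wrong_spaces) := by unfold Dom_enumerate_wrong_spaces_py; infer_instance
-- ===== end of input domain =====

-- B generates each grouping by direct recursion on the position of the first merged
-- space (building the grouping while the merges are chosen), replacing A's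
-- itertools.combinations subsets followed by a per-subset boolean-mask fold
-- (objective: alternative algorithm). A is a generator; both ports return the list
-- of yielded values.

-- ===== PORT A =====
-- res[-1].append(word) / res.append([word]) on the running group list
def pvMaskStep (res : List (List String)) (wb : String × Bool) : List (List String) :=
  if wb.2 then res.dropLast ++ [res.getLastD [] ++ [wb.1]] else res ++ [[wb.1]]

-- nested helper _apply_wrong_mask
def pvApplyWrongMask (first_word : String) (remainder : List String) (bad_mask : List Bool) :
    List String :=
  ((remainder.zip bad_mask).foldl pvMaskStep [[first_word]]).map
    (fun words_group => PySem.Str.join " " words_group)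

def enumerate_wrong_spaces_py (s : String) (max_wrong_spaces : Int) : List (List String) :=
  let orig_words := PySem.Str.split₀ s
  match PySem.List.pyGet? orig_words 0 with   -- orig_words[0]: IndexError on empty ⇒ Pre_
  | none => []
  | some first_word =>
    let remainder := PySem.List.slice orig_words (some 1) none
    let num_spaces : Int := (remainder.length : Int)
    let space_indices := PySem.List.pyRange 0 num_spaces 1
    let wrong_combs : List (PySem.Set Int) :=
      [PySem.Set.ofList []] ++
        (PySem.List.pyRange 1 (min (max_wrong_spaces + 1) num_spaces) 1).flatMap
          (fun num_wrong_spaces =>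
            (PySem.List.combinations space_indices num_wrong_spaces.toNat).map PySem.Set.ofList)
    wrong_combs.map (fun wrong_spaces_indices =>
      pvApplyWrongMask first_word remainder
        (space_indices.map (fun i => PySem.Set.contains wrong_spaces_indices i)))

-- ===== PORT B =====
-- nested generator rec(i, r): groupings of words[i:] with exactly r merged spaces
-- among spaces i..n-1; recursion is structural on r (Python's r is a nonneg count here).
def pvBRec (words : List String) (n : Int) : Int → Nat → List (List (List String))
  | i, 0 => [(PySem.List.slice words (some i) none).map (fun w => [w])]
  | i, r + 1 =>
    (PySem.List.pyRange i (n - ((r + 1 : Nat) : Int) + 1) 1).flatMap (fun j =>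
      (pvBRec words n (j + 1) r).map (fun tail =>
        ((PySem.List.slice words (some i) (some j)).map (fun w => [w])) ++
          match tail with
          | [] => []   -- unreachable: rec always yields nonempty groupings when r > 0
          | g :: gs => (PySem.List.pyGetD words j "" :: g) :: gs))
          -- words[j]: j < n - r ≤ len(words) - 1, always in range

def enumerate_wrong_spaces_py_alt (s : String) (max_wrong_spaces : Int) : List (List String) :=
  let words := PySem.Str.split₀ s
  let n : Int := (words.length : Int) - 1
  ([(0 : Int)] ++ PySem.List.pyRange 1 (min (max_wrong_spaces + 1) n) 1).flatMap
    (fun r => (pvBRec words n 0 r.toNat).map (fun g => g.map (PySem.Str.join " ")))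

-- ===== PRECONDITION & SPEC =====
-- Pre_ excludes exactly the inputs whose s.split() is empty: there A raises IndexError
-- at orig_words[0].
def Pre_enumerate_wrong_spaces_py (s : String) (max_wrong_spaces : Int) : Prop :=
  PySem.Str.split₀ s ≠ []
instance (s : String) (max_wrong_spaces : Int) : Decidable (Pre_enumerate_wrong_spaces_py s max_wrong_spaces) := by unfold Pre_enumerate_wrong_spaces_py; infer_instance
def pvWitness_enumerate_wrong_spaces_py : String × Int := ("a b c", 2)

def Spec_enumerate_wrong_spaces_py (s : String) (max_wrong_spaces : Int) (out : List (List String)) : Prop := out = enumerate_wrong_spaces_py_alt s max_wrong_spaces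
instance (s : String) (max_wrong_spaces : Int) (out : List (List String)) : Decidable (Spec_enumerate_wrong_spaces_py s max_wrong_spaces out) := by unfold Spec_enumerate_wrong_spaces_py; infer_instance

-- ===== CLAIM (what is proved, stated in full; the proofs are below) =====
def Claim_equal_enumerate_wrong_spaces_py : Prop := ∀ (s : String) (max_wrong_spaces : Int), Dom_enumerate_wrong_spaces_py s max_wrong_spaces → Pre_enumerate_wrong_spaces_py s max_wrong_spaces → Spec_enumerate_wrong_spaces_py s max_wrong_spaces (enumerate_wrong_spaces_py s max_wrong_spaces)

-- ===== LEMMAS AND PROOFS =====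

-- group accumulator of A's fold, with the current (last) group split off
def pvGroupRec (cur : List String) : List (String × Bool) → List (List String)
  | [] => [cur]
  | (w, b) :: rest => if b then pvGroupRec (cur ++ [w]) rest else cur :: pvGroupRec [w] rest

-- absolute cut positions (k, k+1, … for successive entries) of the `false` entries of a mask
def pvCuts : List Bool → Nat → List Nat
  | [], _ => []
  | b :: bs, k => if b then pvCuts bs (k + 1) else k :: pvCuts bs (k + 1)

-- split `words` at the ascending cut positions, current chunk starting at index a
def pvChunks (words : List String) : List Nat → Nat → List (List String)
  | [], a => [words.drop a]
  | c :: cs, a => ((words.drop a).take (c - a)) :: pvChunks words cs c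

-- cut positions determined by the complement of a merged-gap list c inside [i, n)
def pvCutsFrom (n i : Nat) (c : List Int) : List Nat :=
  ((List.range' i (n - i)).filter (fun k => !(c.contains ((k : Nat) : Int)))).map (· + 1)

theorem pv_foldl_eq_groupRec (pairs : List (String × Bool)) :
    ∀ (acc : List (List String)) (cur : List String),
      pairs.foldl pvMaskStep (acc ++ [cur]) = acc ++ pvGroupRec cur pairs := by
  induction pairs with
  | nil => intro acc cur; simp [pvGroupRec]
  | cons wb rest ih =>
    intro acc cur
    obtain ⟨w, b⟩ := wb
    cases b with
    | true =>
      have h1 : pvMaskStep (acc ++ [cur]) (w, true) = acc ++ [cur ++ [w]] := by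
        simp [pvMaskStep]
      simp only [List.foldl_cons, h1, ih, pvGroupRec]
      simp
    | false =>
      have h1 : pvMaskStep (acc ++ [cur]) (w, false) = (acc ++ [cur]) ++ [[w]] := by
        simp [pvMaskStep]
      simp only [List.foldl_cons, h1, ih, pvGroupRec]
      simp

theorem pv_cuts_shift (bs : List Bool) : ∀ (k p : Nat),
    pvCuts bs (k + p) = (pvCuts bs k).map (· + p) := by
  induction bs with
  | nil => intro k p; simp [pvCuts]
  | cons b bs ih =>
    intro k p
    cases b with
    | false =>
      show (k + p) :: pvCuts bs (k + p + 1) = ((k :: pvCuts bs (k + 1)).map (· + p))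
      rw [show k + p + 1 = (k + 1) + p from by omega, ih]
      simp
    | true =>
      show pvCuts bs (k + p + 1) = (pvCuts bs (k + 1)).map (· + p)
      rw [show k + p + 1 = (k + 1) + p from by omega, ih]

theorem pv_cuts_append : ∀ (bs₁ bs₂ : List Bool) (k : Nat),
    pvCuts (bs₁ ++ bs₂) k = pvCuts bs₁ k ++ pvCuts bs₂ (k + bs₁.length) := by
  intro bs₁
  induction bs₁ with
  | nil => intro bs₂ k; simp [pvCuts]
  | cons b bs ih =>
    intro bs₂ k
    cases b with
    | false =>
      show k :: pvCuts (bs ++ bs₂) (k + 1)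
        = (k :: pvCuts bs (k + 1)) ++ pvCuts bs₂ (k + (bs.length + 1))
      rw [ih, show k + 1 + bs.length = k + (bs.length + 1) from by omega]
      simp
    | true =>
      show pvCuts (bs ++ bs₂) (k + 1) = pvCuts bs (k + 1) ++ pvCuts bs₂ (k + (bs.length + 1))
      rw [ih, show k + 1 + bs.length = k + (bs.length + 1) from by omega]

theorem pv_cuts_mask (q : Nat → Bool) : ∀ (n : Nat),
    pvCuts ((List.range n).map q) 1 = ((List.range n).filter (fun k => !q k)).map (· + 1) := by
  intro n
  induction n with
  | zero => simp [pvCuts]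
  | succ n ih =>
    rw [List.range_succ, List.map_append, pv_cuts_append, List.filter_append, List.map_append, ih]
    congr 1
    have hlen : ((List.range n).map q).length = n := by simp
    rw [hlen]
    cases hq : q n <;> simp [pvCuts, hq, Nat.add_comm]

theorem pv_chunks_shift : ∀ (cs : List Nat) (pre ys : List String) (a : Nat),
    pvChunks (pre ++ ys) (cs.map (· + pre.length)) (a + pre.length) = pvChunks ys cs a := by
  intro cs
  induction cs with
  | nil =>
    intro pre ys a
    show [(pre ++ ys).drop (a + pre.length)] = [ys.drop a]
    rw [List.drop_append, List.drop_eq_nil_of_le (by omega),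
      show a + pre.length - pre.length = a from by omega, List.nil_append]
  | cons c cs ih =>
    intro pre ys a
    show ((pre ++ ys).drop (a + pre.length)).take ((c + pre.length) - (a + pre.length)) ::
        pvChunks (pre ++ ys) (cs.map (· + pre.length)) (c + pre.length)
      = ((ys.drop a).take (c - a)) :: pvChunks ys cs c
    rw [ih, List.drop_append, List.drop_eq_nil_of_le (by omega),
      show a + pre.length - pre.length = a from by omega, List.nil_append,
      show c + pre.length - (a + pre.length) = c - a from by omega]

theorem pv_groupRec_eq_chunks : ∀ (bs : List Bool) (rest cur : List String),
    bs.length = rest.length →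
    pvGroupRec cur (rest.zip bs) = pvChunks (cur ++ rest) (pvCuts bs cur.length) 0 := by
  intro bs
  induction bs with
  | nil =>
    intro rest cur h
    have : rest = [] := by simpa using h.symm
    subst this
    simp [pvGroupRec, pvChunks, pvCuts]
  | cons b bs ih =>
    intro rest cur h
    match rest with
    | [] => simp at h
    | w :: rest' =>
      have hlen : bs.length = rest'.length := by simpa using h
      cases b with
      | true =>
        simp only [List.zip_cons_cons, pvGroupRec, if_pos]
        rw [ih rest' (cur ++ [w]) hlen]
        simp [pvCuts, List.append_assoc]
      | false =>
        simp only [List.zip_cons_cons, pvGroupRec]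
        rw [if_neg (by simp), ih rest' [w] hlen]
        have hc : pvCuts (false :: bs) cur.length = cur.length :: pvCuts bs (cur.length + 1) := rfl
        have hch : pvChunks (cur ++ w :: rest') (cur.length :: pvCuts bs (cur.length + 1)) 0
            = ((cur ++ w :: rest').drop 0).take (cur.length - 0)
              :: pvChunks (cur ++ w :: rest') (pvCuts bs (cur.length + 1)) cur.length := rfl
        rw [hc, hch]
        congr 1
        · simp
        · simp only [List.length_cons, List.length_nil, List.singleton_append]
          rw [show cur.length + 1 = 1 + cur.length from by omega, pv_cuts_shift bs 1 cur.length]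
          have h2 := pv_chunks_shift (pvCuts bs 1) cur (w :: rest') 0
          rw [Nat.zero_add] at h2
          exact h2.symm

-- A-side core: the mask fold for the subset c = the chunking at pvCutsFrom's cuts
theorem pv_coreA (c : List Int) (first : String) (rest : List String) :
    pvApplyWrongMask first rest
        ((PySem.List.pyRange 0 (rest.length : Int) 1).map
          (fun i => PySem.Set.contains (PySem.Set.ofList c) i))
      = (pvChunks (first :: rest) (pvCutsFrom rest.length 0 c) 0).map
          (PySem.Str.join " ") := by
  have hmask : (PySem.List.pyRange 0 (rest.length : Int) 1).map
        (fun i => PySem.Set.contains (PySem.Set.ofList c) i)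
      = (List.range rest.length).map (fun (k : Nat) => c.contains ((k : Nat) : Int)) := by
    rw [PySem.List.pyRange_zero, Int.toNat_natCast, List.map_map]
    simp [Function.comp_def]
  rw [pvApplyWrongMask, hmask]
  have hfold := pv_foldl_eq_groupRec
    (rest.zip ((List.range rest.length).map (fun (k : Nat) => c.contains ((k : Nat) : Int)))) [] [first]
  rw [List.nil_append, List.nil_append] at hfold
  rw [hfold, pv_groupRec_eq_chunks _ rest [first] (by simp)]
  simp only [List.length_cons, List.length_nil, List.singleton_append]
  rw [pv_cuts_mask]
  rw [show pvCutsFrom rest.length 0 c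
      = ((List.range rest.length).filter
          (fun k => !(c.contains ((k : Nat) : Int)))).map (· + 1) from by
    rw [pvCutsFrom, Nat.sub_zero, ← List.range_eq_range']]

-- splitting combinations over a range by the first chosen element
theorem pv_comb_split : ∀ (len : Nat) (a b : Int), (b - a).toNat = len → ∀ (r : Nat),
    PySem.List.combinations (PySem.List.pyRange a b 1) (r + 1)
      = (PySem.List.pyRange a (b - (r : Int)) 1).flatMap (fun j =>
          (PySem.List.combinations (PySem.List.pyRange (j + 1) b 1) r).map (j :: ·)) := by
  intro len
  induction len with
  | zero =>
    intro a b hlen r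
    have hba : b ≤ a := by omega
    rw [PySem.List.pyRange_one_eq_nil hba, PySem.List.pyRange_one_eq_nil (by omega),
      PySem.List.combinations_nil_succ, List.flatMap_nil]
  | succ len ih =>
    intro a b hlen r
    have hab : a < b := by omega
    rw [PySem.List.pyRange_one_cons hab, PySem.List.combinations_cons_succ,
      ih (a + 1) b (by omega) r]
    by_cases hr : a < b - (r : Int)
    · rw [PySem.List.pyRange_one_cons hr, List.flatMap_cons]
    · have h1 : PySem.List.pyRange a (b - (r : Int)) 1 = [] :=
        PySem.List.pyRange_one_eq_nil (by omega)
      have h2 : PySem.List.pyRange (a + 1) (b - (r : Int)) 1 = [] :=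
        PySem.List.pyRange_one_eq_nil (by omega)
      have h3 : PySem.List.combinations (PySem.List.pyRange (a + 1) b 1) r = [] :=
        PySem.List.combinations_eq_nil_of_length_lt _
          (by rw [PySem.List.length_pyRange_one]; omega)
      rw [h1, h2, h3]
      simp

-- adding one to a Nat range shifts it
theorem pv_map_add_one_range' : ∀ (m i : Nat),
    (List.range' i m).map (· + 1) = List.range' (i + 1) m := by
  intro m
  induction m with
  | zero => intro i; simp
  | succ m ih => intro i; rw [List.range'_succ, List.range'_succ, List.map_cons, ih]

-- splitting a Nat range at an interior point
theorem pv_range'_split : ∀ (m i k : Nat),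
    List.range' i (m + k) = List.range' i m ++ List.range' (i + m) k := by
  intro m
  induction m with
  | zero => intro i k; simp
  | succ m ih =>
    intro i k
    rw [show (m + 1) + k = (m + k) + 1 from by omega, List.range'_succ, ih (i + 1) k,
      List.range'_succ, show i + 1 + m = i + (m + 1) from by omega]
    simp

-- cut list of (j :: c): singleton cuts up to j, then the cuts of c after j
theorem pv_cutsFrom_cons (n i jN : Nat) (c : List Int) (hij : i ≤ jN) (hjn : jN < n)
    (hc : ∀ x ∈ c, ((jN : Nat) : Int) < x) :
    pvCutsFrom n i (((jN : Nat) : Int) :: c)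
      = List.range' (i + 1) (jN - i) ++ pvCutsFrom n (jN + 1) c := by
  have hsplit : List.range' i (n - i)
      = List.range' i (jN - i) ++ jN :: List.range' (jN + 1) (n - (jN + 1)) := by
    rw [show n - i = (jN - i) + (n - jN) from by omega, pv_range'_split,
      show i + (jN - i) = jN from by omega,
      show n - jN = (n - (jN + 1)) + 1 from by omega, List.range'_succ]
  rw [pvCutsFrom, hsplit, List.filter_append, List.filter_cons]
  have hcont : ∀ (l : List Nat),
      l.filter (fun k => !(((jN : Nat) : Int) :: c).contains ((k : Nat) : Int))
        = l.filter
            (fun k => !c.contains ((k : Nat) : Int) && !(((k : Nat) : Int) == ((jN : Nat) : Int))) := by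
    intro l
    apply List.filter_congr
    intro k _
    simp only [List.contains_cons]
    cases h1 : (((k : Nat) : Int) == ((jN : Nat) : Int)) <;>
      cases h2 : c.contains ((k : Nat) : Int) <;> simp [h1, h2]
  rw [hcont, hcont, if_neg (by simp)]
  have hl : (List.range' i (jN - i)).filter
      (fun k => !c.contains ((k : Nat) : Int) && !(((k : Nat) : Int) == ((jN : Nat) : Int)))
      = List.range' i (jN - i) := by
    apply List.filter_eq_self.mpr
    intro k hk
    have hk' : k < jN := by
      have := (List.mem_range'_1.mp hk).2
      omega
    have h1 : ¬ ((k : Nat) : Int) ∈ c := fun hmem => by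
      have := hc _ hmem
      omega
    have h2 : ((k : Nat) : Int) ≠ ((jN : Nat) : Int) := by omega
    simp only [List.contains_eq_mem, Bool.and_eq_true, Bool.not_eq_true', beq_eq_false_iff_ne,
      decide_eq_false_iff_not]
    exact ⟨by simpa using h1, h2⟩
  have hr : (List.range' (jN + 1) (n - (jN + 1))).filter
      (fun k => !c.contains ((k : Nat) : Int) && !(((k : Nat) : Int) == ((jN : Nat) : Int)))
      = (List.range' (jN + 1) (n - (jN + 1))).filter
          (fun k => !c.contains ((k : Nat) : Int)) := by
    apply List.filter_congr
    intro k hk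
    have hk' : jN + 1 ≤ k := (List.mem_range'_1.mp hk).1
    have h2 : ((k : Nat) : Int) ≠ ((jN : Nat) : Int) := by omega
    simp [h2]
  rw [hl, hr, List.map_append, pv_map_add_one_range']
  rfl

-- a run of consecutive cuts produces singleton chunks
theorem pv_chunks_singletons (words : List String) : ∀ (m i : Nat) (cs : List Nat),
    i + m < words.length →
    pvChunks words (List.range' (i + 1) m ++ cs) i
      = ((words.drop i).take m).map (fun w => [w]) ++ pvChunks words cs (i + m) := by
  intro m
  induction m with
  | zero => intro i cs h; simp
  | succ m ih =>
    intro i cs h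
    rw [List.range'_succ, List.cons_append]
    show ((words.drop i).take (i + 1 - i)) :: pvChunks words (List.range' (i + 2) m ++ cs) (i + 1)
      = ((words.drop i).take (m + 1)).map (fun w => [w]) ++ pvChunks words cs (i + (m + 1))
    rw [show i + 2 = (i + 1) + 1 from rfl, ih (i + 1) cs (by omega)]
    rw [List.drop_eq_getElem_cons (by omega : i < words.length)]
    simp only [List.take_succ_cons, List.map_cons, List.cons_append,
      show i + 1 - i = 1 from by omega, List.take_succ_cons, List.take_zero]
    rw [show i + 1 + m = i + (m + 1) from by omega]

-- the cuts of the empty merge set produce all-singleton chunks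
theorem pv_chunks_range' (words : List String) (m i : Nat) (h : words.length = i + m + 1) :
    pvChunks words (List.range' (i + 1) m) i = (words.drop i).map (fun w => [w]) := by
  have h1 := pv_chunks_singletons words m i [] (by omega)
  rw [List.append_nil] at h1
  rw [h1]
  have hdrop : words.drop (i + m) = [words.getD (i + m) ""] := by
    rw [List.drop_eq_getElem_cons (by omega : i + m < words.length),
      List.drop_eq_nil_of_le (by omega), List.getD_eq_getElem words "" (by omega)]
  rw [show pvChunks words [] (i + m) = [words.drop (i + m)] from rfl, hdrop]
  have h2 : (words.drop i).drop m = words.drop (i + m) := by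
    rw [List.drop_drop]
  have hsplit : (words.drop i).take m ++ [words.getD (i + m) ""] = words.drop i := by
    conv_rhs => rw [← List.take_append_drop m (words.drop i)]
    rw [h2, hdrop]
  conv_rhs => rw [← hsplit]
  rw [List.map_append]
  rfl

-- pvChunks is never empty
theorem pv_chunks_ne_nil (words : List String) : ∀ (cs : List Nat) (a : Nat),
    pvChunks words cs a ≠ [] := by
  intro cs a
  cases cs <;> simp [pvChunks]

-- moving the chunk start one left prepends that word to the first chunk
theorem pv_chunks_head (words : List String) (jN : Nat) (cs : List Nat)
    (hj : jN < words.length) (hcs : ∀ x ∈ cs, jN + 2 ≤ x) :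
    pvChunks words cs jN
      = (words.getD jN "" :: (pvChunks words cs (jN + 1)).headD [])
          :: (pvChunks words cs (jN + 1)).tail := by
  cases cs with
  | nil =>
    show [words.drop jN] = (words.getD jN "" :: ([words.drop (jN + 1)]).headD []) :: _
    rw [List.drop_eq_getElem_cons hj, List.getD_eq_getElem words "" hj]
    rfl
  | cons c cs =>
    have hc : jN + 2 ≤ c := hcs c (List.mem_cons_self ..)
    show ((words.drop jN).take (c - jN)) :: pvChunks words cs c
      = (words.getD jN ""
          :: ((((words.drop (jN + 1)).take (c - (jN + 1))) :: pvChunks words cs c).headD []))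
        :: (((words.drop (jN + 1)).take (c - (jN + 1))) :: pvChunks words cs c).tail
    rw [List.headD_cons, List.tail_cons]
    congr 1
    rw [List.drop_eq_getElem_cons hj, show c - jN = (c - (jN + 1)) + 1 from by omega,
      List.take_succ_cons, List.getD_eq_getElem words "" hj]

-- B's recursion enumerates the combinations, each grouped by chunking at its cuts
theorem pv_bRec_eq (words : List String) (n : Nat) (hw : words.length = n + 1) :
    ∀ (r : Nat) (i : Nat), i ≤ n →
      pvBRec words (n : Int) ((i : Nat) : Int) r
        = (PySem.List.combinations (PySem.List.pyRange ((i : Nat) : Int) ((n : Nat) : Int) 1) r).map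
            (fun c => pvChunks words (pvCutsFrom n i c) i) := by
  intro r
  induction r with
  | zero =>
    intro i hi
    rw [pvBRec, PySem.List.combinations_zero, List.map_cons, List.map_nil]
    rw [PySem.List.slice_from_natCast]
    congr 1
    rw [show pvCutsFrom n i [] = List.range' (i + 1) (n - i) from by
        rw [pvCutsFrom]
        rw [List.filter_eq_self.mpr (by intro k _; simp), pv_map_add_one_range'],
      pv_chunks_range' words (n - i) i (by omega)]
  | succ r ih =>
    intro i hi
    rw [pvBRec, pv_comb_split ((((n : Nat) : Int) - ((i : Nat) : Int)).toNat) _ _ rfl r,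
      List.map_flatMap]
    rw [show ((n : Nat) : Int) - ((r + 1 : Nat) : Int) + 1 = ((n : Nat) : Int) - ((r : Nat) : Int)
        from by push_cast; ring]
    rw [List.flatMap_def, List.flatMap_def]
    congr 1
    apply List.map_congr_left
    intro j hj
    have hj' : ((i : Nat) : Int) ≤ j ∧ j < ((n : Nat) : Int) - ((r : Nat) : Int) :=
      PySem.List.mem_pyRange_one.mp hj
    obtain ⟨jN, rfl⟩ : ∃ jN : Nat, j = ((jN : Nat) : Int) :=
      ⟨j.toNat, by omega⟩
    have hij : i ≤ jN := by exact_mod_cast hj'.1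
    have hjn : jN < n := by omega
    rw [show ((jN : Nat) : Int) + 1 = (((jN + 1 : Nat)) : Int) from by push_cast; ring,
      ih (jN + 1) (by omega)]
    simp only [List.map_map]
    apply List.map_congr_left
    intro c hc
    have hcmem : ∀ x ∈ c, ((jN : Nat) : Int) < x := by
      intro x hx
      have hsub := PySem.List.sublist_of_mem_combinations hc
      have : x ∈ PySem.List.pyRange (((jN + 1 : Nat)) : Int) ((n : Nat) : Int) 1 :=
        hsub.mem hx
      have := (PySem.List.mem_pyRange_one.mp this).1
      omega
    simp only [Function.comp_apply]
    -- left side: the glue step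
    rw [PySem.List.slice_natCast]
    have htail := pv_chunks_head words jN (pvCutsFrom n (jN + 1) c) (by omega)
      (by
        intro x hx
        rw [pvCutsFrom] at hx
        obtain ⟨k, hk, rfl⟩ := List.mem_map.mp hx
        have := (List.mem_range'_1.mp (List.mem_filter.mp hk).1).1
        omega)
    rw [pv_cutsFrom_cons n i jN c hij hjn hcmem,
      pv_chunks_singletons words (jN - i) i (pvCutsFrom n (jN + 1) c) (by omega),
      show i + (jN - i) = jN from by omega, htail]
    cases hpc : pvChunks words (pvCutsFrom n (jN + 1) c) (jN + 1) with
    | nil => exact absurd hpc (pv_chunks_ne_nil words _ _)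
    | cons g gs =>
      simp only [List.headD_cons, List.tail_cons, PySem.List.pyGetD_natCast]

-- ===== VERDICT (by name: the statement is the Claim_ definition above) =====
theorem enumerate_wrong_spaces_py_spec : Claim_equal_enumerate_wrong_spaces_py := by
  intro s m hdom hpre
  unfold Spec_enumerate_wrong_spaces_py
  obtain ⟨first, rest, hws⟩ := List.exists_cons_of_ne_nil hpre
  simp only [enumerate_wrong_spaces_py, enumerate_wrong_spaces_py_alt, hws]
  simp only [PySem.List.pyGet?_zero, List.getElem?_cons_zero, PySem.List.slice_from_one,
    List.tail_cons, List.length_cons]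
  rw [show ((rest.length + 1 : Nat) : Int) - 1 = ((rest.length : Nat) : Int) from by
    push_cast; ring]
  have hb := pv_bRec_eq (first :: rest) rest.length (by simp)
  rw [List.flatMap_append, List.map_append]
  congr 1
  · -- the size-0 (empty wrong set) element
    simp only [List.map_cons, List.map_nil, List.flatMap_cons, List.flatMap_nil,
      List.append_nil, Int.toNat_zero]
    rw [show ((0 : Int)) = (((0 : Nat)) : Int) from rfl, hb 0 0 (by omega),
      PySem.List.combinations_zero]
    simp only [List.map_cons, List.map_nil]
    exact congrArg (fun x => [x]) (pv_coreA [] first rest)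
  · rw [List.map_flatMap, List.flatMap_def, List.flatMap_def]
    congr 1
    apply List.map_congr_left
    intro k hk
    have hk' := PySem.List.mem_pyRange_one.mp hk
    rw [show ((0 : Int)) = (((0 : Nat)) : Int) from rfl, hb k.toNat 0 (by omega),
      List.map_map, List.map_map]
    apply List.map_congr_left
    intro c hc
    exact pv_coreA c first rest
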